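-- pv_equiv track=rewrite | github.com/Rakeshrallabandi/leetcode_problems | 3860-resulting-string-after-adjacent-removals/resulting-string-after-adjacent-removals.py | resultingString
-- ===== SOURCE A (Python) =====
-- def resultingString(s: str) -> str:
--     k = []
--     for ch in s:
--         k.append(ch)
--         while len(k) >= 2:
--             a, b = k[-1], k[-2]
--
--             if (ord(a) - ord(b)) % 26 == 1 or (ord(b) - ord(a)) % 26 == 1:
--                 k.pop()
--                 k.pop()
--             else:
--                 break
--     return ''.join(k)
-- ===== SOURCE B (Python) =====
-- def resultingString(s: str) -> str:
--     def remove_first(t):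
--         # index of the leftmost removable adjacent pair, spliced out; None if no pair
--         for i in range(len(t) - 1):
--             if (ord(t[i]) - ord(t[i + 1])) % 26 == 1 or (ord(t[i + 1]) - ord(t[i])) % 26 == 1:
--                 return t[:i] + t[i + 2:]
--         return None
--     t = s
--     while True:
--         r = remove_first(t)
--         if r is None:
--             return t
--         t = r
-- ===== Notes on version B (the rewrite author's own statement) =====
-- stated objective: alternative
-- what changed: Replaces the single left-to-right stack pass with a fixpoint loop that repeatedly scans the whole string for the leftmost removable adjacent pair, splices it out, and restarts until no pair remains.
import Mathlib
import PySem

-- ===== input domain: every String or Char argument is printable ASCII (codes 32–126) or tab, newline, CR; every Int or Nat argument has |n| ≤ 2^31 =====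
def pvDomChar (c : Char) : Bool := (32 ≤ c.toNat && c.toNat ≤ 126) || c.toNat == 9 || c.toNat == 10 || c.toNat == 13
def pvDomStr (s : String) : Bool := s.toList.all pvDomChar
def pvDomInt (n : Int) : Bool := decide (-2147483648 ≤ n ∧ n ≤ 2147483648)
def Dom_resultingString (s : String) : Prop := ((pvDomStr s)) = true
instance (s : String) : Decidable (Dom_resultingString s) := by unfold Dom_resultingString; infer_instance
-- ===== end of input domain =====

-- B replaces A's single stack pass by a repeated leftmost-pair-removal fixpoint (alternative decomposition, not faster).

-- shared pair test: (ord a - ord b) % 26 == 1 or (ord b - ord a) % 26 == 1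
def pvPair (a b : Char) : Bool :=
  (PySem.Int.mod ((a.toNat : Int) - (b.toNat : Int)) 26 == 1) ||
  (PySem.Int.mod ((b.toNat : Int) - (a.toNat : Int)) 26 == 1)

-- ===== PORT A =====
-- Python's stack k (append/pop at the end) is modelled with the TOP at the head.
-- popA is the inner `while len(k) >= 2: ...` loop after a push.
def popA (k : List Char) : List Char :=
  match k with
  | a :: b :: rest => if pvPair a b then popA rest else a :: b :: rest
  | k => k

def resultingString (s : String) : String :=
  String.mk ((s.toList.foldl (fun k ch => popA (ch :: k)) []).reverse)

-- ===== PORT B =====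
-- `for i in range(len(t)-1): if removable(t[i],t[i+1]): return i`-style scan
def findPair : List Char → Option Nat
  | a :: b :: t => if pvPair a b then some 0 else (findPair (b :: t)).map (· + 1)
  | _ => none

-- needed for reduceB's termination
theorem findPair_bound (t : List Char) (i : Nat) (h : findPair t = some i) : i + 2 ≤ t.length := by
  induction t generalizing i with
  | nil => simp [findPair] at h
  | cons a t ih =>
    cases t with
    | nil => simp [findPair] at h
    | cons b r =>
      by_cases hp : pvPair a b
      · simp [findPair, hp] at h
        simp [List.length_cons]
        omega
      · simp [findPair, hp] at h
        obtain ⟨j, hj, rfl⟩ := h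
        have := ih j hj
        simp at this ⊢
        omega

-- the `while True` loop: splice out the leftmost pair (t[:i] + t[i+2:]) until none remains
def reduceB (t : List Char) : List Char :=
  match h : findPair t with
  | some i => reduceB (t.take i ++ t.drop (i + 2))
  | none => t
termination_by t.length
decreasing_by
  have := findPair_bound t i h
  simp [List.length_append, List.length_take, List.length_drop]
  omega

def resultingString_alt (s : String) : String :=
  String.mk (reduceB s.toList)

-- ===== PRECONDITION & SPEC =====
def Spec_resultingString (s : String) (out : String) : Prop := out = resultingString_alt s
instance (s : String) (out : String) : Decidable (Spec_resultingString s out) := by unfold Spec_resultingString; infer_instance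

-- ===== CLAIM (what is proved, stated in full; the proofs are below) =====
def Claim_equal_resultingString : Prop := ∀ (s : String), Dom_resultingString s → Spec_resultingString s (resultingString s)

-- ===== LEMMAS AND PROOFS =====

-- `l` has no removable adjacent pair
def noPair : List Char → Bool
  | a :: b :: t => !pvPair a b && noPair (b :: t)
  | _ => true

theorem pvPair_symm (a b : Char) : pvPair a b = pvPair b a := by
  unfold pvPair; exact Bool.or_comm _ _

theorem noPair_concat (u : List Char) (a : Char) :
    noPair (u ++ [a]) = (noPair u && ((u.getLast?.map (fun b => !pvPair b a)).getD true)) := by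
  induction u with
  | nil => simp [noPair]
  | cons b u ih =>
    cases u with
    | nil => simp [noPair]
    | cons c u' =>
      simp only [List.cons_append] at ih
      simp only [List.cons_append, noPair, List.getLast?_cons_cons, ih]
      rw [Bool.and_assoc]

theorem noPair_reverse (l : List Char) : noPair l.reverse = noPair l := by
  induction l with
  | nil => rfl
  | cons a l ih =>
    rw [List.reverse_cons, noPair_concat, ih, List.getLast?_reverse]
    cases l with
    | nil => simp [noPair]
    | cons b l' =>
      simp only [List.head?_cons, Option.map_some, Option.getD_some, noPair]
      rw [pvPair_symm b a, Bool.and_comm]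

theorem findPair_none_iff (t : List Char) : findPair t = none ↔ noPair t = true := by
  induction t with
  | nil => simp [findPair, noPair]
  | cons a t ih =>
    cases t with
    | nil => simp [findPair, noPair]
    | cons b r =>
      by_cases hp : pvPair a b
      · simp [findPair, noPair, hp]
      · simp [findPair, noPair, hp, ih]

theorem findPair_concat_pair (q : List Char) (x c : Char) (r : List Char)
    (hq : noPair (q ++ [x]) = true) (hp : pvPair x c = true) :
    findPair (q ++ x :: c :: r) = some q.length := by
  induction q with
  | nil => simp [findPair, hp]
  | cons a q ih =>
    cases q with
    | nil =>
      simp [noPair] at hq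
      simp [findPair, hq, hp]
    | cons b q' =>
      simp only [noPair, List.cons_append, Bool.and_eq_true, Bool.not_eq_eq_eq_not,
        Bool.not_true] at hq
      have h2 := ih (by simpa [noPair] using hq.2)
      simp only [List.cons_append] at h2 ⊢
      simp [findPair, hq.1, h2]

theorem popA_noPair (l : List Char) (h : noPair l = true) : popA l = l := by
  cases l with
  | nil => rfl
  | cons a l =>
    cases l with
    | nil => rfl
    | cons b t =>
      simp [noPair] at h
      simp [popA, h.1]

theorem reduceB_noPair (t : List Char) (h : noPair t = true) : reduceB t = t := by
  rw [reduceB]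
  split
  · rename_i i hi
    rw [(findPair_none_iff t).mpr h] at hi
    exact absurd hi (by simp)
  · rfl

theorem reduceB_step (q : List Char) (x c : Char) (r : List Char)
    (hq : noPair (q ++ [x]) = true) (hp : pvPair x c = true) :
    reduceB (q ++ x :: c :: r) = reduceB (q ++ r) := by
  rw [reduceB]
  split
  · rename_i i hi
    rw [findPair_concat_pair q x c r hq hp] at hi
    injection hi with hi
    subst hi
    congr 1
    have htake : (q ++ x :: c :: r).take q.length = q := by simp
    have hdrop : (q ++ x :: c :: r).drop (q.length + 2) = r := by
      simp [List.drop_append]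
    rw [htake, hdrop]
  · rename_i hi
    rw [findPair_concat_pair q x c r hq hp] at hi
    exact absurd hi (by simp)

-- main simulation lemma: rp is A's stack (top first), rp.reverse the already-irreducible prefix
theorem reduce_eq_fold (rest : List Char) : ∀ (rp : List Char), noPair rp.reverse = true →
    reduceB (rp.reverse ++ rest) = (List.foldl (fun k ch => popA (ch :: k)) rp rest).reverse := by
  induction rest with
  | nil =>
    intro rp h
    rw [List.append_nil, List.foldl_nil, reduceB_noPair _ h]
  | cons ch rest' ih =>
    intro rp h
    rw [List.foldl_cons]
    cases rp with
    | nil =>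
      have := ih [ch] (by simp [noPair])
      simpa [popA] using this
    | cons x rq =>
      by_cases hp : pvPair ch x
      · -- pop case: the boundary pair (x, ch) is the leftmost removable pair
        have hrq : noPair rq.reverse = true := by
          have := noPair_concat rq.reverse x
          rw [List.reverse_cons] at h
          rw [this] at h
          exact (Bool.and_eq_true ..).mp h |>.1
        have hstep : reduceB (rq.reverse ++ x :: ch :: rest') = reduceB (rq.reverse ++ rest') := by
          apply reduceB_step
          · rw [← List.reverse_cons]; exact h
          · rw [pvPair_symm]; exact hp
        have hpop : popA (ch :: x :: rq) = rq := by
          have : popA rq = rq := popA_noPair rq (by rw [← noPair_reverse]; exact hrq)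
          simp [popA, hp, this]
        rw [List.reverse_cons, List.append_assoc, List.singleton_append, hstep, hpop]
        exact ih rq hrq
      · -- push case: no pair at the boundary, the stack grows
        have hpop : popA (ch :: x :: rq) = ch :: x :: rq := by simp [popA, hp]
        have hinv : noPair ((ch :: x :: rq).reverse) = true := by
          rw [show (ch :: x :: rq).reverse = (x :: rq).reverse ++ [ch] by simp]
          rw [noPair_concat, h]
          have : (x :: rq).reverse.getLast? = some x := by
            rw [List.getLast?_reverse]; rfl
          rw [this]
          simp [pvPair_symm x ch, hp]
        have := ih (ch :: x :: rq) hinv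
        rw [hpop]
        rw [show (ch :: x :: rq).reverse = (x :: rq).reverse ++ [ch] by simp] at this
        rw [List.append_assoc, List.singleton_append] at this
        exact this

-- ===== VERDICT (by name: the statement is the Claim_ definition above) =====
theorem resultingString_spec : Claim_equal_resultingString := by
  intro s _
  unfold Spec_resultingString resultingString resultingString_alt
  congr 1
  have h := reduce_eq_fold s.toList [] (by simp [noPair])
  simp only [List.reverse_nil, List.nil_append] at h
  exact h.symm
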